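-- pv_equiv track=rewrite | github.com/sinerslb/algorithms | agility.py | vic_score
-- ===== SOURCE A (Python) =====
-- from typing import Dict, List
--
-- def vic_score(game_field: List[str], num_of_keys: int) -> int:
--     """Подсчёт максимально возможных победных очков."""
--
--     # находим количество вхождений каждой цифры
--     presence_num: Dict = dict()
--     for num in game_field:
--         if num in presence_num:
--             presence_num[num] += 1
--         else:
--             presence_num[num] = 1
--
--     # определяем варианты, доступные игрокам
--     score: int = 0
--     for key, val in presence_num.items():
--         if val <= num_of_keys * 2:
--             score += 1
--
--     return score
-- ===== SOURCE B (Python) =====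
-- def vic_score(game_field, num_of_keys):
--     """Подсчёт максимально возможных победных очков."""
--     limit = num_of_keys * 2
--     s = sorted(game_field)
--     score = 0
--     i = 0
--     while i < len(s):
--         j = i + 1
--         while j < len(s) and s[j] == s[i]:
--             j += 1
--         if j - i <= limit:
--             score += 1
--         i = j
--     return score
-- ===== Notes on version B (the rewrite author's own statement) =====
-- stated objective: alternative
-- what changed: Replaces hash counting (frequency dict then a pass over its items) with sort-then-run-length: sort a copy of game_field and walk consecutive equal runs with an index loop, scoring each run whose length is at most num_of_keys*2.
import Mathlib
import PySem

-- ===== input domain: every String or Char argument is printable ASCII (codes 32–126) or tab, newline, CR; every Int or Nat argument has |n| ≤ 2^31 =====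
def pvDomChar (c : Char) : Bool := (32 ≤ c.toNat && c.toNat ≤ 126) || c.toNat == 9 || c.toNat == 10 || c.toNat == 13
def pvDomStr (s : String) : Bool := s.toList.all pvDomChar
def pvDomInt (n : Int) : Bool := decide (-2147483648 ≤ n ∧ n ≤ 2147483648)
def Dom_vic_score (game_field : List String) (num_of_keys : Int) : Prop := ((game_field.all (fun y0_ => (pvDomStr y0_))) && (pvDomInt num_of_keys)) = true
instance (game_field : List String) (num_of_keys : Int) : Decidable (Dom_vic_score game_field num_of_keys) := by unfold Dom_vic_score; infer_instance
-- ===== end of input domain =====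

-- B replaces A's frequency dict with sort-then-run-length scanning; objective: alternative (same result, different algorithm).

-- ===== PORT A =====
def vic_score (game_field : List String) (num_of_keys : Int) : Int :=
  let presence_num : PySem.Dict String Int :=
    game_field.foldl
      (fun d num =>
        if d.contains num then d.insert num (d.getD num 0 + 1)
        else d.insert num 1)
      PySem.Dict.empty
  presence_num.items.foldl
    (fun score kv => if kv.2 ≤ num_of_keys * 2 then score + 1 else score) 0

-- ===== PORT B =====
-- outer while loop of Source B: structural recursion on the sorted suffix; the inner
-- while (advancing j over equal elements) is the takeWhile/dropWhile of the run,
-- j - i = 1 + run.length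
def vicRuns (limit : Int) : List String → Int
  | [] => 0
  | x :: rest =>
    let run := rest.takeWhile (fun y => y == x)
    (if (1 + (run.length : Int)) ≤ limit then 1 else 0)
      + vicRuns limit (rest.dropWhile (fun y => y == x))
termination_by l => l.length
decreasing_by
  exact Nat.lt_succ_of_le (List.length_dropWhile_le _ _)

def vic_score_alt (game_field : List String) (num_of_keys : Int) : Int :=
  vicRuns (num_of_keys * 2) (PySem.List.sorted game_field (fun x => x) false)

-- ===== PRECONDITION & SPEC =====
def Spec_vic_score (game_field : List String) (num_of_keys : Int) (out : Int) : Prop := out = vic_score_alt game_field num_of_keys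
instance (game_field : List String) (num_of_keys : Int) (out : Int) : Decidable (Spec_vic_score game_field num_of_keys out) := by unfold Spec_vic_score; infer_instance

-- ===== CLAIM (what is proved, stated in full; the proofs are below) =====
def Claim_equal_vic_score : Prop := ∀ (game_field : List String) (num_of_keys : Int), Dom_vic_score game_field num_of_keys → Spec_vic_score game_field num_of_keys (vic_score game_field num_of_keys)

-- ===== LEMMAS AND PROOFS =====

-- A's dict-building step is the counter step
lemma a_dict_eq_counter (l : List String) :
    l.foldl
      (fun (d : PySem.Dict String Int) num =>
        if d.contains num then d.insert num (d.getD num 0 + 1)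
        else d.insert num 1)
      PySem.Dict.empty = PySem.Dict.counter l := by
  rw [← PySem.Dict.foldl_insert_getD_add_one_eq_counter]
  congr 1
  funext d x
  by_cases h : d.contains x = true
  · rw [if_pos h]
  · rw [if_neg h]
    have hnone : d.get? x = none := by
      rw [PySem.Dict.get?_eq_none_iff_not_mem_keys]
      intro hx
      exact h (by rw [PySem.Dict.contains_eq_decide_mem_keys]; exact decide_eq_true hx)
    rw [show d.getD x 0 = 0 by simp [PySem.Dict.getD, hnone],
        show (0 : Int) + 1 = 1 by norm_num]

-- the first elements of the runs of s (one per run)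
def runHeads : List String → List String
  | [] => []
  | x :: rest => x :: runHeads (rest.dropWhile (fun y => y == x))
termination_by l => l.length
decreasing_by
  exact Nat.lt_succ_of_le (List.length_dropWhile_le _ _)

lemma mem_runHeads (s : List String) : ∀ v, v ∈ runHeads s ↔ v ∈ s := by
  induction s using runHeads.induct with
  | case1 => simp [runHeads]
  | case2 x rest ih =>
    intro v
    rw [runHeads]
    constructor
    · intro hv
      rcases List.mem_cons.mp hv with h | h
      · simp [h]
      · have := (ih v).mp h
        exact List.mem_cons.mpr (Or.inr ((List.dropWhile_sublist _).subset this))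
    · intro hv
      rcases List.mem_cons.mp hv with h | h
      · simp [h]
      · rcases (List.takeWhile_append_dropWhile (p := fun y => y == x) (l := rest)) ▸ h with h'
        rcases List.mem_append.mp h' with h2 | h2
        · have : v = x := by
            have := List.mem_takeWhile_imp h2
            simpa using this
          simp [this]
        · exact List.mem_cons.mpr (Or.inr ((ih v).mpr h2))

-- in a nondecreasing list x :: rest, x does not reappear after its run
lemma not_mem_dropWhile_of_sorted (x : String) (rest : List String)
    (hs : (x :: rest).Pairwise (· ≤ ·)) :
    x ∉ rest.dropWhile (fun y => y == x) := by
  intro hx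
  rcases hd : rest.dropWhile (fun y => y == x) with _ | ⟨h, t⟩
  · simp [hd] at hx
  · have hw : rest.dropWhile (fun y => y == x) ≠ [] := by simp [hd]
    have hhead := List.head_dropWhile_not (fun y => y == x) hw
    simp only [hd, List.head_cons] at hhead
    have hne : h ≠ x := by simpa using hhead
    have hxle : x ≤ h := by
      have hmem : h ∈ rest := (List.dropWhile_sublist _).subset (by rw [hd]; exact List.mem_cons_self ..)
      exact (List.pairwise_cons.mp hs).1 h hmem
    have hlt : x < h := lt_of_le_of_ne hxle (Ne.symm hne)
    rw [hd] at hx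
    rcases List.mem_cons.mp hx with h1 | h1
    · exact hne h1.symm
    · -- x occurs in t; but t's elements are ≥ h > x
      have hrest := (List.pairwise_cons.mp hs).2
      have hsub : (h :: t).Pairwise (· ≤ ·) := by
        have := hrest.sublist (hd ▸ rest.dropWhile_sublist (p := fun y => y == x))
        exact this
      have : h ≤ x := (List.pairwise_cons.mp hsub).1 x h1
      exact absurd (lt_of_lt_of_le hlt this) (lt_irrefl x)

lemma nodup_runHeads (s : List String) (hs : s.Pairwise (· ≤ ·)) :
    (runHeads s).Nodup := by
  induction s using runHeads.induct with
  | case1 => simp [runHeads]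
  | case2 x rest ih =>
    rw [runHeads]
    refine List.nodup_cons.mpr ⟨?_, ?_⟩
    · intro hx
      exact not_mem_dropWhile_of_sorted x rest hs ((mem_runHeads _ x).mp hx)
    · exact ih (((List.pairwise_cons.mp hs).2).sublist (rest.dropWhile_sublist _))

-- count of the run head in a sorted list = the run length
lemma count_head_sorted (x : String) (rest : List String)
    (hs : (x :: rest).Pairwise (· ≤ ·)) :
    (x :: rest).count x = 1 + (rest.takeWhile (fun y => y == x)).length := by
  have hnd : x ∉ rest.dropWhile (fun y => y == x) := not_mem_dropWhile_of_sorted x rest hs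
  have hsplit : rest = rest.takeWhile (fun y => y == x) ++ rest.dropWhile (fun y => y == x) :=
    (List.takeWhile_append_dropWhile ..).symm
  rw [List.count_cons_self]
  conv_lhs => rw [hsplit]
  rw [List.count_append]
  have h1 : (rest.takeWhile (fun y => y == x)).count x
      = (rest.takeWhile (fun y => y == x)).length := by
    apply List.count_eq_length.mpr
    intro y hy
    have hyx : y = x := by simpa using List.mem_takeWhile_imp hy
    exact hyx.symm
  have h2 : (rest.dropWhile (fun y => y == x)).count x = 0 :=
    List.count_eq_zero.mpr hnd
  omega

-- count of a later value is unchanged by removing the first run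
lemma count_tail_sorted (x v : String) (rest : List String) (hv : v ≠ x) :
    (x :: rest).count v = (rest.dropWhile (fun y => y == x)).count v := by
  have hsplit : rest = rest.takeWhile (fun y => y == x) ++ rest.dropWhile (fun y => y == x) :=
    (List.takeWhile_append_dropWhile ..).symm
  rw [List.count_cons_of_ne (Ne.symm hv)]
  conv_lhs => rw [hsplit]
  rw [List.count_append]
  have : (rest.takeWhile (fun y => y == x)).count v = 0 := by
    apply List.count_eq_zero.mpr
    intro hvmem
    exact hv (by simpa using List.mem_takeWhile_imp hvmem)
  omega

-- the run scan counts the distinct values whose multiplicity in s is within the limit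
lemma vicRuns_eq_countP (limit : Int) (s : List String) (hs : s.Pairwise (· ≤ ·)) :
    vicRuns limit s
      = ((runHeads s).countP (fun v => decide ((s.count v : Int) ≤ limit)) : Int) := by
  induction s using runHeads.induct with
  | case1 => rw [vicRuns, runHeads]; simp
  | case2 x rest ih =>
    rw [vicRuns, runHeads, List.countP_cons]
    have hd := rest.dropWhile_sublist (p := fun y => y == x)
    have hsd : (rest.dropWhile (fun y => y == x)).Pairwise (· ≤ ·) :=
      ((List.pairwise_cons.mp hs).2).sublist hd
    rw [ih hsd]
    have hcount : ((x :: rest).count x : Int)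
        = 1 + ((rest.takeWhile (fun y => y == x)).length : Int) := by
      rw [count_head_sorted x rest hs]; push_cast; ring
    have hcongr :
        (runHeads (rest.dropWhile (fun y => y == x))).countP
            (fun v => decide (((rest.dropWhile (fun y => y == x)).count v : Int) ≤ limit))
        = (runHeads (rest.dropWhile (fun y => y == x))).countP
            (fun v => decide (((x :: rest).count v : Int) ≤ limit)) := by
      apply List.countP_congr
      intro v hv
      have hvmem : v ∈ rest.dropWhile (fun y => y == x) := (mem_runHeads _ v).mp hv
      have hvne : v ≠ x := by
        intro h; exact not_mem_dropWhile_of_sorted x rest hs (h ▸ hvmem)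
      rw [count_tail_sorted x v rest hvne]
    rw [hcongr, hcount]
    by_cases hle : (1 + ((rest.takeWhile (fun y => y == x)).length : Int)) ≤ limit
    · rw [if_pos hle, if_pos (by simpa using hle)]
      push_cast; ring
    · rw [if_neg hle, if_neg (by simpa using hle)]
      push_cast; ring

-- ===== VERDICT (by name: the statement is the Claim_ definition above) =====
theorem vic_score_spec : Claim_equal_vic_score := by
  intro gf nk _
  unfold Spec_vic_score vic_score vic_score_alt
  simp only [a_dict_eq_counter, PySem.Dict.items_counter, List.foldl_map]
  rw [PySem.List.foldl_ite_add_one]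
  set s := PySem.List.sorted gf (fun x => x) false with hsdef
  have hperm : s.Perm gf := PySem.List.sorted_perm ..
  have hsorted : s.Pairwise (· ≤ ·) := PySem.List.sorted_pairwise ..
  rw [vicRuns_eq_countP _ s hsorted]
  have hcnt : (fun v => decide ((s.count v : Int) ≤ nk * 2))
      = (fun v => decide ((gf.count v : Int) ≤ nk * 2)) := by
    funext v; rw [hperm.count_eq]
  rw [hcnt]
  have hpermheads : (runHeads s).Perm (PySem.Set.ofList gf) := by
    rw [List.perm_ext_iff_of_nodup (nodup_runHeads s hsorted) (PySem.Set.nodup_ofList gf)]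
    intro v
    rw [mem_runHeads, PySem.Set.mem_ofList, hperm.mem_iff]
  rw [hpermheads.countP_eq]
  norm_num
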